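-- pv_equiv track=rewrite | github.com/MorinoseiMorizo/sentence_similarity | bleu.py | get_bleu_stats
-- ===== SOURCE A (Python) =====
-- from collections import defaultdict
--
-- def get_bleu_stats(ref, hyp, N=4):
--     ref = list(map(str, ref))
--     hyp = list(map(str, hyp))
--     stats = defaultdict(int, {'rl': len(ref), 'hl': len(hyp)})
--     N = len(hyp) if len(hyp) < N else N
--     for n in range(N):
--         matched = 0
--         possible = defaultdict(int)
--         for k in range(len(ref) - n):
--             possible[tuple(ref[k : k + n + 1])] += 1
--         for k in range(len(hyp) - n):
--             ngram = tuple(hyp[k : k + n + 1])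
--             if possible[ngram] > 0:
--                 possible[ngram] -= 1
--                 matched += 1
--         stats['d' + str(n + 1)] = len(hyp) - n
--         stats['n' + str(n + 1)] = matched
--     return stats
-- ===== SOURCE B (Python) =====
-- def get_bleu_stats(ref, hyp, N=4):
--     ref = [str(x) for x in ref]
--     hyp = [str(x) for x in hyp]
--
--     def ngrams(xs, n):
--         return [tuple(xs[k:k + n]) for k in range(len(xs) - n + 1)]
--
--     stats = {'rl': len(ref), 'hl': len(hyp)}
--     for n in range(1, min(N, len(hyp)) + 1):
--         hg, rg = ngrams(hyp, n), ngrams(ref, n)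
--         matched = sum(min(hg.count(g), rg.count(g)) for g in dict.fromkeys(hg))
--         stats.update({'d' + str(n): len(hyp) - n + 1, 'n' + str(n): matched})
--     return stats
-- ===== Notes on version B (the rewrite author's own statement) =====
-- stated objective: alternative
-- what changed: A's two mutable defaultdicts (a reference counter built by modify and a budget dict decremented conditionally while scanning the hypothesis) are gone: B materialises the two n-gram lists with a helper, computes the clipped match count as sum of min(hg.count(g), rg.count(g)) over the distinct hypothesis n-grams, iterates n 1-based, and adds each pair of entries with dict.update into a plain dict literal.
import Mathlib
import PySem

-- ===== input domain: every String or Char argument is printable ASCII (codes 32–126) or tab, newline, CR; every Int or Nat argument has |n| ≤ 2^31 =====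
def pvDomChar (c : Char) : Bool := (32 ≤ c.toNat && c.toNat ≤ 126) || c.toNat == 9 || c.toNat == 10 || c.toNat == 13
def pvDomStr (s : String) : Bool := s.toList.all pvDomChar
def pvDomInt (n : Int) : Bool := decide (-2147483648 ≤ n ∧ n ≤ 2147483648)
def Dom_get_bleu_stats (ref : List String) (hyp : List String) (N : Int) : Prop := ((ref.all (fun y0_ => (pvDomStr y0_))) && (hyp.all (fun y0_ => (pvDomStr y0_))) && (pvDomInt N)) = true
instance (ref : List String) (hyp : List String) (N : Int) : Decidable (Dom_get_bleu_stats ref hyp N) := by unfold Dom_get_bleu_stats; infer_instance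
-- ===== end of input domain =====

-- B drops A's mutable defaultdicts entirely: n-gram lists + clipped counts via
-- min(list.count, list.count) over the distinct hypothesis n-grams, entries added with
-- dict.update, 1-based n; alternative decomposition, same results, no speed claim.


-- ===== PORT A =====
-- list(map(str, ·)) on a list of str is the identity and is ported as the list itself;
-- tuple(ref[k:k+n+1]) is ported as the slice itself (a List String used as a Dict key);
-- defaultdict(int) reads are ported as getD · 0 (the read in 'if possible[ngram] > 0' also
-- inserts a 0 entry in Python, which no later lookup can distinguish from its absence).
def get_bleu_stats (ref : List String) (hyp : List String) (N : Int) : List (String × Int) :=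
  let stats0 : PySem.Dict String Int :=
    (PySem.Dict.empty.insert "rl" (ref.length : Int)).insert "hl" (hyp.length : Int)
  let N' : Int := if (hyp.length : Int) < N then (hyp.length : Int) else N
  let stats := (PySem.List.pyRange 0 N' 1).foldl (fun stats n =>
    -- possible[tuple(ref[k:k+n+1])] += 1
    let possible : PySem.Dict (List String) Int := (PySem.List.pyRange 0 ((ref.length : Int) - n) 1).foldl
      (fun d k => d.modify (PySem.List.slice ref (some k) (some (k + n + 1))) 0 (· + 1)) PySem.Dict.empty
    -- if possible[ngram] > 0: possible[ngram] -= 1; matched += 1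
    let pm := (PySem.List.pyRange 0 ((hyp.length : Int) - n) 1).foldl
      (fun s k =>
        let ngram := PySem.List.slice hyp (some k) (some (k + n + 1))
        if s.1.getD ngram 0 > 0 then (s.1.insert ngram (s.1.getD ngram 0 - 1), s.2 + 1) else s)
      (possible, (0 : Int))
    let stats := stats.insert ("d" ++ PySem.Int.toStr (n + 1)) ((hyp.length : Int) - n)
    stats.insert ("n" ++ PySem.Int.toStr (n + 1)) pm.2) stats0
  stats.items

-- ===== PORT B =====
-- tuple(xs[k:k+n]) is ported as the slice itself; dict.fromkeys(hg) iterates the distinct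
-- n-grams in first-occurrence order = PySem.Set.ofList hg; list.count is PySem.List.count.
def pvNgrams (xs : List String) (n : Int) : List (List String) :=
  (PySem.List.pyRange 0 ((xs.length : Int) - n + 1) 1).map
    (fun k => PySem.List.slice xs (some k) (some (k + n)))

def get_bleu_stats_alt (ref : List String) (hyp : List String) (N : Int) : List (String × Int) :=
  ((PySem.List.pyRange 1 (min N (hyp.length : Int) + 1) 1).foldl (fun stats n =>
      let hg := pvNgrams hyp n
      let rg := pvNgrams ref n
      let matched : Int :=
        ((PySem.Set.ofList hg).map
          (fun g => ((min (PySem.List.count hg g) (PySem.List.count rg g) : Nat) : Int))).sum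
      stats.update [("d" ++ PySem.Int.toStr n, (hyp.length : Int) - n + 1),
                    ("n" ++ PySem.Int.toStr n, matched)])
    (PySem.Dict.ofList [("rl", (ref.length : Int)), ("hl", (hyp.length : Int))])).items

-- ===== PRECONDITION & SPEC =====
def Spec_get_bleu_stats (ref : List String) (hyp : List String) (N : Int) (out : List (String × Int)) : Prop := out = get_bleu_stats_alt ref hyp N
instance (ref : List String) (hyp : List String) (N : Int) (out : List (String × Int)) : Decidable (Spec_get_bleu_stats ref hyp N out) := by unfold Spec_get_bleu_stats; infer_instance

-- ===== CLAIM (what is proved, stated in full; the proofs are below) =====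
def Claim_equal_get_bleu_stats : Prop := ∀ (ref : List String) (hyp : List String) (N : Int), Dom_get_bleu_stats ref hyp N → Spec_get_bleu_stats ref hyp N (get_bleu_stats ref hyp N)

-- ===== LEMMAS AND PROOFS =====

-- A's greedy decrement-scan over l with budget dict d counts Σ_{g distinct in l} min(count_l g, d[g]).
lemma pv_scan_eq {κ : Type} [BEq κ] [LawfulBEq κ] [DecidableEq κ] (l : List κ) (d : PySem.Dict κ Int) (m : Int)
    (h : ∀ g, 0 ≤ d.getD g 0) :
    (l.foldl (fun s g => if s.1.getD g 0 > 0 then (s.1.insert g (s.1.getD g 0 - 1), s.2 + 1) else s)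
      (d, m)).2
    = m + (l.dedup.map (fun g => min ((l.count g : Int)) (d.getD g 0))).sum := by
  induction l generalizing d m with
  | nil => simp
  | cons g t ih =>
    simp only [List.foldl_cons]
    by_cases hpos : d.getD g 0 > 0
    · simp only [hpos, if_pos]
      have h' : ∀ x, 0 ≤ (d.insert g (d.getD g 0 - 1)).getD x 0 := by
        intro x
        rw [PySem.Dict.getD_insert]
        split_ifs with hx
        · omega
        · exact h x
      rw [ih (d.insert g (d.getD g 0 - 1)) (m + 1) h']
      by_cases hg : g ∈ t
      · rw [List.dedup_cons_of_mem hg]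
        have hgd : g ∈ t.dedup := List.mem_dedup.mpr hg
        have hsplit : ∀ (F : κ → Int),
            (t.dedup.map F).sum = F g + ((t.dedup.erase g).map F).sum := by
          intro F
          rw [((List.perm_cons_erase hgd).map F).sum_eq, List.map_cons, List.sum_cons]
        rw [hsplit, hsplit]
        have hmaps : (t.dedup.erase g).map
              (fun x => min ((t.count x : Int)) ((d.insert g (d.getD g 0 - 1)).getD x 0))
            = (t.dedup.erase g).map
              (fun x => min (((g :: t).count x : Int)) (d.getD x 0)) := by
          apply List.map_congr_left
          intro x hx
          have hxg : x ≠ g := ((t.nodup_dedup.mem_erase_iff).mp hx).1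
          rw [PySem.Dict.getD_insert, if_neg hxg, List.count_cons]
          simp [hxg.symm]
        rw [hmaps]
        have hcg : ((g :: t).count g : Int) = (t.count g : Int) + 1 := by
          rw [List.count_cons_self]; push_cast; ring
        rw [PySem.Dict.getD_insert, if_pos rfl, hcg]
        omega
      · rw [List.dedup_cons_of_notMem hg]
        simp only [List.map_cons, List.sum_cons]
        have hmaps : t.dedup.map
              (fun x => min ((t.count x : Int)) ((d.insert g (d.getD g 0 - 1)).getD x 0))
            = t.dedup.map
              (fun x => min (((g :: t).count x : Int)) (d.getD x 0)) := by
          apply List.map_congr_left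
          intro x hx
          have hxg : x ≠ g := fun he => hg (he ▸ List.mem_dedup.mp hx)
          rw [PySem.Dict.getD_insert, if_neg hxg, List.count_cons]
          simp [hxg.symm]
        rw [hmaps]
        have hc0 : t.count g = 0 := List.count_eq_zero_of_not_mem hg
        rw [List.count_cons_self, hc0]
        norm_num
        omega
    · simp only [hpos, if_false]
      rw [ih d m h]
      have hdg : d.getD g 0 = 0 := le_antisymm (by omega) (h g)
      by_cases hg : g ∈ t
      · rw [List.dedup_cons_of_mem hg]
        congr 1
        apply congrArg
        apply List.map_congr_left
        intro x hx
        by_cases hxg : x = g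
        · subst hxg
          rw [hdg, List.count_cons_self]
          have : (0:Int) ≤ (t.count x : Int) := by positivity
          omega
        · rw [List.count_cons, if_neg (by simp [Ne.symm hxg])]
          simp
      · rw [List.dedup_cons_of_notMem hg]
        simp only [List.map_cons, List.sum_cons]
        have hmaps : t.dedup.map (fun x => min ((t.count x : Int)) (d.getD x 0))
            = t.dedup.map (fun x => min (((g :: t).count x : Int)) (d.getD x 0)) := by
          apply List.map_congr_left
          intro x hx
          have hxg : x ≠ g := fun he => hg (he ▸ List.mem_dedup.mp hx)
          rw [List.count_cons, if_neg (by simp [Ne.symm hxg])]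
          simp
        rw [hmaps, hdg, List.count_cons_self]
        have : (0:Int) ≤ ((g::t).count g : Int) := by positivity
        omega

-- Set.ofList l and l.dedup enumerate the same distinct elements, so the sums agree.
lemma pv_sum_ofList_eq_dedup {κ : Type} [BEq κ] [LawfulBEq κ] [DecidableEq κ] (l : List κ) (f : κ → Int) :
    ((PySem.Set.ofList l).map f).sum = (l.dedup.map f).sum := by
  have hp : (PySem.Set.ofList l).Perm l.dedup := by
    apply List.perm_of_nodup_nodup_toFinset_eq (PySem.Set.nodup_ofList l) l.nodup_dedup
    ext x
    simp [PySem.Set.mem_ofList, List.mem_dedup, List.mem_toFinset]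
  exact (hp.map f).sum_eq

-- For one n: A's matched (scan with decrement) equals B's clipped count at n+1.
lemma pv_matched_eq (ref hyp : List String) (n : Int) :
    ((PySem.List.pyRange 0 ((hyp.length : Int) - n) 1).foldl
      (fun (s : PySem.Dict (List String) Int × Int) k =>
        if s.1.getD (PySem.List.slice hyp (some k) (some (k + n + 1))) 0 > 0 then
          (s.1.insert (PySem.List.slice hyp (some k) (some (k + n + 1)))
            (s.1.getD (PySem.List.slice hyp (some k) (some (k + n + 1))) 0 - 1), s.2 + 1)
        else s)
      ((PySem.List.pyRange 0 ((ref.length : Int) - n) 1).foldl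
        (fun d k => d.modify (PySem.List.slice ref (some k) (some (k + n + 1))) 0 (· + 1))
        PySem.Dict.empty, (0 : Int))).2
    = ((PySem.Set.ofList (pvNgrams hyp (n + 1))).map
        (fun g => ((min (PySem.List.count (pvNgrams hyp (n + 1)) g)
                        (PySem.List.count (pvNgrams ref (n + 1)) g) : Nat) : Int))).sum := by
  have hng : ∀ (xs : List String), pvNgrams xs (n + 1)
      = (PySem.List.pyRange 0 ((xs.length : Int) - n) 1).map
          (fun k => PySem.List.slice xs (some k) (some (k + n + 1))) := by
    intro xs
    unfold pvNgrams
    have : (xs.length : Int) - (n + 1) + 1 = (xs.length : Int) - n := by ring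
    rw [this]
    apply List.map_congr_left
    intro k _
    have : k + (n + 1) = k + n + 1 := by ring
    rw [this]
  have hstep :
      ((PySem.List.pyRange 0 ((hyp.length : Int) - n) 1).foldl
        (fun (s : PySem.Dict (List String) Int × Int) k =>
          if s.1.getD (PySem.List.slice hyp (some k) (some (k + n + 1))) 0 > 0 then
            (s.1.insert (PySem.List.slice hyp (some k) (some (k + n + 1)))
              (s.1.getD (PySem.List.slice hyp (some k) (some (k + n + 1))) 0 - 1), s.2 + 1)
          else s)
        ((PySem.List.pyRange 0 ((ref.length : Int) - n) 1).foldl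
          (fun d k => d.modify (PySem.List.slice ref (some k) (some (k + n + 1))) 0 (· + 1))
          PySem.Dict.empty, (0 : Int))).2
      = ((pvNgrams hyp (n + 1)).foldl
          (fun (s : PySem.Dict (List String) Int × Int) g =>
            if s.1.getD g 0 > 0 then (s.1.insert g (s.1.getD g 0 - 1), s.2 + 1) else s)
          (PySem.Dict.counter (pvNgrams ref (n + 1)), (0 : Int))).2 := by
    rw [hng, hng, PySem.Dict.counter_eq_foldl, List.foldl_map, List.foldl_map]
  rw [hstep, pv_scan_eq _ _ _ (fun g => by rw [PySem.Dict.getD_counter]; positivity)]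
  rw [pv_sum_ofList_eq_dedup]
  simp only [zero_add]
  apply congrArg
  apply List.map_congr_left
  intro g _
  rw [PySem.Dict.getD_counter, PySem.List.count_eq, PySem.List.count_eq]
  push_cast
  rfl

-- dict.update with a two-element list is two inserts (definitional).
lemma pv_update_two (d : PySem.Dict String Int) (p q : String × Int) :
    d.update [p, q] = (d.insert p.1 p.2).insert q.1 q.2 := rfl

lemma pv_main (ref : List String) (hyp : List String) (N : Int) :
    get_bleu_stats ref hyp N = get_bleu_stats_alt ref hyp N := by
  simp only [get_bleu_stats, get_bleu_stats_alt]
  have hN : (if ((hyp.length : Int)) < N then ((hyp.length : Int)) else N) = min N (hyp.length : Int) := by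
    split_ifs <;> omega
  rw [hN]
  congr 1
  -- reindex: B runs n over 1..N, A over 0..N-1
  rw [PySem.List.pyRange_one 0 (min N (hyp.length : Int)),
      PySem.List.pyRange_one 1 (min N (hyp.length : Int) + 1)]
  have hlen : (min N (hyp.length : Int) + 1 - 1).toNat = (min N (hyp.length : Int) - 0).toNat := by
    omega
  rw [hlen, List.foldl_map, List.foldl_map]
  apply PySem.List.foldl_congr_mem
  intro acc k _
  dsimp only
  have h1 : (1 : Int) + (k : Int) = (0 + (k : Int)) + 1 := by ring
  rw [h1]
  rw [pv_update_two]
  have hd : (hyp.length : Int) - (0 + (k : Int) + 1) + 1 = (hyp.length : Int) - (0 + (k : Int)) := by ring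
  rw [hd]
  congr 1
  exact pv_matched_eq ref hyp (0 + (k : Int))

-- ===== VERDICT (by name: the statement is the Claim_ definition above) =====
theorem get_bleu_stats_spec : Claim_equal_get_bleu_stats := by
  intro ref hyp N _
  unfold Spec_get_bleu_stats
  exact pv_main ref hyp N
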